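-- pv_equiv track=rewrite | github.com/shahpriyesh/PracticeCode | StringQuestions/wordsFromChars.py | countCharsOfFormedWordsFromChars
-- ===== SOURCE A (Python) =====
-- def countCharsOfFormedWordsFromChars(words, chars):
--     charmap = {}
--     result = 0
--
--     for c in chars:
--         if c in charmap:
--             charmap[c] += 1
--         else:
--             charmap[c] = 1
--
--     for word in words:
--
--         flag = True
--         dummy_charmap = charmap.copy()
--         wordlen = len(word)
--
--         for idx in range(wordlen):
--             if word[idx] not in dummy_charmap or dummy_charmap[word[idx]] == 0:
--                 flag = False
--                 break
--             dummy_charmap[word[idx]] -= 1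
--
--         if flag:
--             result += wordlen
--
--     return result
-- ===== SOURCE B (Python) =====
-- def countCharsOfFormedWordsFromChars(words, chars):
--     avail = {}
--     for c in chars:
--         avail[c] = avail.get(c, 0) + 1
--     total = 0
--     for w in words:
--         need = {}
--         for c in w:
--             need[c] = need.get(c, 0) + 1
--         if all(cnt <= avail.get(c, 0) for c, cnt in need.items()):
--             total += len(w)
--     return total
-- ===== Notes on version B (the rewrite author's own statement) =====
-- stated objective: alternative
-- what changed: Instead of copying the master char map for every word and consuming it character by character with an early break, B builds a per-word frequency map in one pass and decides formability by comparing it entry-wise against the master map built once.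
import Mathlib
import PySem

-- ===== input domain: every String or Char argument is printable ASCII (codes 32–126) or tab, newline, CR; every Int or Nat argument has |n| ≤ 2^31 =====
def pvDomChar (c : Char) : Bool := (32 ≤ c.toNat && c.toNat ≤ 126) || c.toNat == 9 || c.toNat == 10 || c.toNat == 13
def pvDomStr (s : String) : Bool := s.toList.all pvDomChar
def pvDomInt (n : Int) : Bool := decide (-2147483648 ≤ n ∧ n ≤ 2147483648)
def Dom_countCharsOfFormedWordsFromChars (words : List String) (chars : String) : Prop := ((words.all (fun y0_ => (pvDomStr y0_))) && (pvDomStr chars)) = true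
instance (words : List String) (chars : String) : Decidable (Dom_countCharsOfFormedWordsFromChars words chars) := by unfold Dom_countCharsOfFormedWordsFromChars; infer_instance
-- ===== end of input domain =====

-- B replaces A's copy-the-master-map-and-decrement-with-early-break simulation by building a
-- per-word frequency map once and comparing it entry-wise against the master map (alternative decomposition).


-- ===== PORT A =====
-- 'for c in chars: if c in charmap: charmap[c] += 1 else: charmap[c] = 1'
def pvBuildA (chars : List Char) : PySem.Dict Char Int :=
  chars.foldl (fun d c =>
    match d.get? c with
    | some v => d.insert c (v + 1)
    | none => d.insert c 1) PySem.Dict.empty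

-- the inner 'for idx in range(wordlen)' loop with its early break; iterates the word's chars
def pvCheckA : List Char → PySem.Dict Char Int → Bool
  | [], _ => true
  | c :: rest, d =>
    match d.get? c with
    | none => false
    | some v => if v == 0 then false else pvCheckA rest (d.insert c (v - 1))

def countCharsOfFormedWordsFromChars (words : List String) (chars : String) : Int :=
  let charmap := pvBuildA chars.toList
  words.foldl (fun result word =>
    if pvCheckA word.toList charmap then result + (word.toList.length : Int) else result) 0

-- ===== PORT B =====
-- 'avail[c] = avail.get(c, 0) + 1'
def pvCounterB (cs : List Char) : PySem.Dict Char Int :=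
  cs.foldl (fun d c => d.insert c (d.getD c 0 + 1)) PySem.Dict.empty

def countCharsOfFormedWordsFromChars_alt (words : List String) (chars : String) : Int :=
  let avail := pvCounterB chars.toList
  words.foldl (fun total w =>
    if ((pvCounterB w.toList).items.all (fun p => p.2 ≤ avail.getD p.1 0)) then
      total + (w.toList.length : Int)
    else total) 0

-- ===== PRECONDITION & SPEC =====
def Spec_countCharsOfFormedWordsFromChars (words : List String) (chars : String) (out : Int) : Prop := out = countCharsOfFormedWordsFromChars_alt words chars
instance (words : List String) (chars : String) (out : Int) : Decidable (Spec_countCharsOfFormedWordsFromChars words chars out) := by unfold Spec_countCharsOfFormedWordsFromChars; infer_instance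

-- ===== CLAIM (what is proved, stated in full; the proofs are below) =====
def Claim_equal_countCharsOfFormedWordsFromChars : Prop := ∀ (words : List String) (chars : String), Dom_countCharsOfFormedWordsFromChars words chars → Spec_countCharsOfFormedWordsFromChars words chars (countCharsOfFormedWordsFromChars words chars)

-- ===== LEMMAS AND PROOFS =====

-- A's map-building loop step equals B's: 'insert (get+1) / insert 1' is 'insert (getD 0 + 1)'
lemma pvBuildA_eq_counterB (cs : List Char) : pvBuildA cs = pvCounterB cs := by
  unfold pvBuildA pvCounterB
  congr 1
  funext d c
  cases hg : d.get? c with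
  | none => simp [PySem.Dict.getD_of_get?_eq_none d 0 hg]
  | some v => simp [PySem.Dict.getD_of_get?_eq_some d 0 hg]

lemma counterB_eq_counter (cs : List Char) : pvCounterB cs = PySem.Dict.counter cs :=
  PySem.Dict.foldl_insert_getD_add_one_eq_counter cs

lemma counterB_getD (cs : List Char) (c : Char) : (pvCounterB cs).getD c 0 = (cs.count c : Int) := by
  rw [counterB_eq_counter]; exact PySem.Dict.getD_counter cs c

-- A's consume-and-decrement loop succeeds iff every character count of the word fits in d
lemma pvCheckA_iff (l : List Char) (d : PySem.Dict Char Int)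
    (hd : ∀ c, 0 ≤ d.getD c 0) :
    pvCheckA l d = true ↔ ∀ c, (l.count c : Int) ≤ d.getD c 0 := by
  induction l generalizing d with
  | nil =>
    simp only [pvCheckA, List.count_nil]
    constructor
    · intro _ c; simpa using hd c
    · intro _; trivial
  | cons c rest ih =>
    simp only [pvCheckA]
    cases hg : d.get? c with
    | none =>
      have h0 : d.getD c 0 = 0 := PySem.Dict.getD_of_get?_eq_none d 0 hg
      simp only [Bool.false_eq_true, false_iff]
      intro h
      have := h c
      rw [h0, List.count_cons_self] at this
      push_cast at this
      omega
    | some v =>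
      have hv : d.getD c 0 = v := PySem.Dict.getD_of_get?_eq_some d 0 hg
      by_cases h0 : v = 0
      · simp only [h0, beq_self_eq_true, if_true, Bool.false_eq_true, false_iff]
        intro h
        have := h c
        rw [hv, h0, List.count_cons_self] at this
        push_cast at this
        omega
      · have hv1 : 1 ≤ v := by have := hd c; omega
        simp only [beq_iff_eq, h0, if_false]
        have hd' : ∀ c', 0 ≤ (d.insert c (v - 1)).getD c' 0 := by
          intro c'
          rw [PySem.Dict.getD_insert]
          split_ifs with he
          · omega
          · exact hd c'
        rw [ih _ hd']
        constructor
        · intro h c'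
          have := h c'
          rw [PySem.Dict.getD_insert] at this
          by_cases he : c' = c
          · subst he
            rw [List.count_cons_self, hv]
            simp at this
            push_cast
            omega
          · rw [List.count_cons_of_ne (Ne.symm he)]
            simpa [he] using this
        · intro h c'
          have := h c'
          rw [PySem.Dict.getD_insert]
          by_cases he : c' = c
          · subst he
            rw [List.count_cons_self, hv] at this
            simp only [↓reduceIte]
            omega
          · rw [List.count_cons_of_ne (Ne.symm he)] at this
            simpa [he] using this

-- B's per-word comparison holds iff every character count of the word fits in avail
lemma itemsAll_iff (w : List Char) (avail : PySem.Dict Char Int)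
    (ha : ∀ c, 0 ≤ avail.getD c 0) :
    ((pvCounterB w).items.all (fun p => p.2 ≤ avail.getD p.1 0) = true) ↔
      ∀ c, (w.count c : Int) ≤ avail.getD c 0 := by
  rw [counterB_eq_counter, PySem.Dict.items_counter]
  simp only [List.all_map, List.all_eq_true, Function.comp, decide_eq_true_eq]
  constructor
  · intro h c
    by_cases hc : c ∈ w
    · exact h c ((PySem.Set.mem_ofList _ _).2 hc)
    · rw [List.count_eq_zero_of_not_mem hc]
      simpa using ha c
  · intro h c _
    exact h c

lemma cond_eq (w cs : List Char) :
    pvCheckA w (pvBuildA cs) =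
      ((pvCounterB w).items.all (fun p => p.2 ≤ (pvCounterB cs).getD p.1 0)) := by
  have ha : ∀ c, 0 ≤ (pvCounterB cs).getD c 0 := by
    intro c; rw [counterB_getD]; positivity
  rw [Bool.eq_iff_iff]
  rw [pvBuildA_eq_counterB, pvCheckA_iff w _ ha, itemsAll_iff w _ ha]

lemma foldl_eq (words : List String) (cs : List Char) (acc : Int) :
    words.foldl (fun result word =>
      if pvCheckA word.toList (pvBuildA cs) then result + (word.toList.length : Int) else result) acc =
    words.foldl (fun total w =>
      if ((pvCounterB w.toList).items.all (fun p => p.2 ≤ (pvCounterB cs).getD p.1 0)) then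
        total + (w.toList.length : Int)
      else total) acc := by
  induction words generalizing acc with
  | nil => rfl
  | cons w ws ih =>
    simp only [List.foldl_cons, cond_eq]

-- ===== VERDICT (by name: the statement is the Claim_ definition above) =====
theorem countCharsOfFormedWordsFromChars_spec : Claim_equal_countCharsOfFormedWordsFromChars := by
  intro words chars _
  unfold Spec_countCharsOfFormedWordsFromChars countCharsOfFormedWordsFromChars countCharsOfFormedWordsFromChars_alt
  exact foldl_eq words chars.toList 0
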